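-- pv_equiv track=rewrite | github.com/JakubMlocek/Algorithms_and_Data_Structures | bstTree/drzewo-przedzia-punkt.py | zwroc
-- ===== SOURCE A (Python) =====
-- def zwroc(t, i):
--     suma = 0
--     i += len(t) // 2
--     suma += t[i][0]
--     while (i > 1):
--         i //= 2
--         suma += t[i][0]
--     return suma
-- ===== SOURCE B (Python) =====
-- def zwroc(t, i):
--     def up(j):
--         return t[j][0] if j <= 1 else t[j][0] + up(j // 2)
--     return up(i + len(t) // 2)
-- ===== Notes on version B (the rewrite author's own statement) =====
-- stated objective: alternative
-- what changed: Replaces the accumulator while-loop with a recursive leaf-to-root climb up(j) that carries no explicit sum variable.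
import Mathlib
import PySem

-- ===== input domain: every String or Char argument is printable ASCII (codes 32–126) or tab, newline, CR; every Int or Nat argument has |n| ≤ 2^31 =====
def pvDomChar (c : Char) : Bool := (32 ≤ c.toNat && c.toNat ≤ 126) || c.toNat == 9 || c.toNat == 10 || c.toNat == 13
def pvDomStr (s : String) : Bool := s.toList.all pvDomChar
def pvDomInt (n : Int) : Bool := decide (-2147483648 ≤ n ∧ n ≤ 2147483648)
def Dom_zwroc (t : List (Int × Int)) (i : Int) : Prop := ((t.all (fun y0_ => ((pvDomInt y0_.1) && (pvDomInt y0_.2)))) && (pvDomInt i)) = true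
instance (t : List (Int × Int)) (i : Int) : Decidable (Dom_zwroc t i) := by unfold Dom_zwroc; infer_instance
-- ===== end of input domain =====

-- B replaces the accumulator while-loop with a recursive leaf-to-root climb carrying no sum variable.

-- ===== PORT A =====
-- t[j][0] with Python's negative-index wraparound; `none` (IndexError) only outside Pre_, where .getD supplies an irrelevant default
def pvGetA (t : List (Int × Int)) (j : Int) : Int := ((PySem.List.pyGet? t j).getD (0, 0)).1

-- the `while i > 1:` loop, state (i, suma)
def zwrocLoop (t : List (Int × Int)) (i : Int) (suma : Int) : Int :=
  if _h : i > 1 then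
    zwrocLoop t (PySem.Int.floordiv i 2) (suma + pvGetA t (PySem.Int.floordiv i 2))
  else suma
termination_by i.toNat
decreasing_by
  have := PySem.Int.floordiv_eq_ediv_of_pos (a := i) (b := 2) (by omega)
  omega

def zwroc (t : List (Int × Int)) (i : Int) : Int :=
  let i1 := i + PySem.Int.floordiv (Int.ofNat t.length) 2
  let suma := 0 + pvGetA t i1
  zwrocLoop t i1 suma

-- ===== PORT B =====
def upB (t : List (Int × Int)) (j : Int) : Int :=
  if _h : j ≤ 1 then ((PySem.List.pyGet? t j).getD (0, 0)).1
  else ((PySem.List.pyGet? t j).getD (0, 0)).1 + upB t (PySem.Int.floordiv j 2)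
termination_by j.toNat
decreasing_by
  have := PySem.Int.floordiv_eq_ediv_of_pos (a := j) (b := 2) (by omega)
  omega

def zwroc_alt (t : List (Int × Int)) (i : Int) : Int :=
  upB t (i + PySem.Int.floordiv (Int.ofNat t.length) 2)

-- ===== PRECONDITION & SPEC =====
-- Pre_ excludes exactly the inputs where Python A raises IndexError: the leaf index outside [-len(t), len(t)).
def Pre_zwroc (t : List (Int × Int)) (i : Int) : Prop :=
  -(Int.ofNat t.length) ≤ i + PySem.Int.floordiv (Int.ofNat t.length) 2 ∧
  i + PySem.Int.floordiv (Int.ofNat t.length) 2 < Int.ofNat t.length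
instance (t : List (Int × Int)) (i : Int) : Decidable (Pre_zwroc t i) := by unfold Pre_zwroc; infer_instance

def pvWitness_zwroc : (List (Int × Int)) × Int := ([(0, 0), (10, 0), (5, 0), (3, 0)], 1)

def Spec_zwroc (t : List (Int × Int)) (i : Int) (out : Int) : Prop := out = zwroc_alt t i
instance (t : List (Int × Int)) (i : Int) (out : Int) : Decidable (Spec_zwroc t i out) := by unfold Spec_zwroc; infer_instance

-- ===== CLAIM (what is proved, stated in full; the proofs are below) =====
def Claim_equal_zwroc : Prop := ∀ (t : List (Int × Int)) (i : Int), Dom_zwroc t i → Pre_zwroc t i → Spec_zwroc t i (zwroc t i)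

-- ===== LEMMAS AND PROOFS =====
-- loop invariant: the while-loop adds exactly the recursive tail of B's climb
theorem zwrocLoop_eq_upB (t : List (Int × Int)) (j suma : Int) :
    zwrocLoop t j suma = suma - pvGetA t j + upB t j := by
  by_cases h : j > 1
  · have hrec := zwrocLoop_eq_upB t (PySem.Int.floordiv j 2) (suma + pvGetA t (PySem.Int.floordiv j 2))
    rw [zwrocLoop, upB]
    simp only [h, dif_pos, dif_neg (by omega : ¬ j ≤ 1)]
    rw [hrec]
    unfold pvGetA
    ring
  · rw [zwrocLoop, upB]
    simp only [dif_neg h, dif_pos (by omega : j ≤ 1)]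
    unfold pvGetA
    ring
termination_by j.toNat
decreasing_by
  have := PySem.Int.floordiv_eq_ediv_of_pos (a := j) (b := 2) (by omega)
  omega

-- ===== VERDICT (by name: the statement is the Claim_ definition above) =====
theorem zwroc_spec : Claim_equal_zwroc := by
  intro t i _ _
  unfold Spec_zwroc zwroc zwroc_alt
  simp only
  rw [zwrocLoop_eq_upB]
  unfold pvGetA
  ring
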